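-- pv_equiv track=rewrite | github.com/kalimido702-maker/IQTTAXIAPPS | clientNotes/analyze_chat_media.py | parse_date_from_filename
-- ===== SOURCE A (Python) =====
-- def parse_date_from_filename(filename: str) -> str:
--     """Extract date from WhatsApp media filename."""
--     # Pattern: *-PHOTO-YYYY-MM-DD-HH-MM-SS.jpg or *-VIDEO-...
--     parts = filename.split("-")
--     for i, part in enumerate(parts):
--         if part in ("PHOTO", "VIDEO") and i + 3 < len(parts):
--             try:
--                 year = parts[i + 1]
--                 month = parts[i + 2]
--                 day = parts[i + 3]
--                 return f"{year}-{month}-{day}"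
--             except (IndexError, ValueError):
--                 pass
--     return "unknown-date"
-- ===== SOURCE B (Python) =====
-- def parse_date_from_filename(filename: str) -> str:
--     """Extract date from WhatsApp media filename."""
--     # Char-level scan: never split the string; hop from token start to token
--     # start with find('-'), and on a marker return the three hyphen-fields
--     # that follow it, read straight out of the string.
--     suffix = filename
--     while True:
--         if suffix.startswith("PHOTO-") or suffix.startswith("VIDEO-"):
--             date = _three_fields(suffix[6:])
--             if date is not None:
--                 return date
--         h = suffix.find("-")
--         if h < 0:
--             return "unknown-date"
--         suffix = suffix[h + 1:]
--
--
-- def _three_fields(s):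
--     # s starts just after "MARKER-": take field "-" field "-" field, where a
--     # field is a (possibly empty) hyphen-free run; None if fewer than three.
--     b = s.find("-")
--     if b < 0:
--         return None
--     t = s[b + 1:]
--     c = t.find("-")
--     if c < 0:
--         return None
--     u = t[c + 1:]
--     d = u.find("-")
--     return s[:b] + "-" + t[:c] + "-" + (u if d < 0 else u[:d])
-- ===== Notes on version B (the rewrite author's own statement) =====
-- stated objective: alternative
-- what changed: A splits the filename into a token list and scans it with indices; B never splits: it scans the raw string char-level, hopping from token start to token start with find('-'), matching the marker with startswith('PHOTO-'/'VIDEO-') and returning the three following hyphen-fields sliced directly out of the string.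
import Mathlib
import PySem

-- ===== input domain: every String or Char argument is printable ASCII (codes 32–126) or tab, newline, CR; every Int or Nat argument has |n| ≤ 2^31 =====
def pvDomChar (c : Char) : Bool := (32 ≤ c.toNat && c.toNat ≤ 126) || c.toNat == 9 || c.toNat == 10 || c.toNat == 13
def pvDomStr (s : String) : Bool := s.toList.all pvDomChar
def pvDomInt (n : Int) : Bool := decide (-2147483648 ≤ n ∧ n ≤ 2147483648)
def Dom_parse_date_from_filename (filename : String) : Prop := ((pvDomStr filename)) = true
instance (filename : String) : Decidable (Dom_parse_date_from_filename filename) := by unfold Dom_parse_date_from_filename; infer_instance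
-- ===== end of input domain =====

-- B replaces A's split-into-tokens-and-index scan by a char-level scan of the raw string:
-- it hops from token start to token start with find('-') and slices the three date fields
-- straight out of the string (alternative decomposition, same cost).


-- ===== PORT A =====
-- `for i, part in enumerate(parts)` rendered as a recursion carrying the index i;
-- the indexing parts[i+1..i+3] is pyGetD (always in range under the guard i+3 < len,
-- so the try/except branch of A is dead and exact here).
def pvALoop (parts : List String) : Int → List String → String
  | _, [] => "unknown-date"
  | i, part :: rest =>
      if (part = "PHOTO" ∨ part = "VIDEO") ∧ i + 3 < (parts.length : Int) then
        PySem.List.pyGetD parts (i + 1) "" ++ "-" ++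
          PySem.List.pyGetD parts (i + 2) "" ++ "-" ++
          PySem.List.pyGetD parts (i + 3) ""
      else pvALoop parts (i + 1) rest

def parse_date_from_filename (filename : String) : String :=
  -- filename.split("-"): sep is the nonempty literal "-", so split? is always `some` and getD [] is exact
  let parts := (PySem.Str.split? filename "-").getD []
  pvALoop parts 0 parts

-- ===== PORT B =====
-- _three_fields(s): three find('-')/slice steps on code-point lists (PySem.Chars/List are exact here)
def pvThreeFields (s : List Char) : Option (List Char) :=
  let b := PySem.Chars.find s ['-']
  if b < 0 then none
  else
    let t := PySem.List.slice s (some (b + 1)) none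
    let c := PySem.Chars.find t ['-']
    if c < 0 then none
    else
      let u := PySem.List.slice t (some (c + 1)) none
      let d := PySem.Chars.find u ['-']
      some (PySem.List.slice s none (some b) ++ '-' ::
              (PySem.List.slice t none (some c) ++ '-' ::
                (if d < 0 then u else PySem.List.slice u none (some d))))

-- the `while True` loop over shrinking suffixes; the shared fall-through to find/advance
-- is the `none` branch of the match (Python reaches it when the marker test or _three_fields fails)
def pvBLoop (suffix : List Char) : List Char :=
  match (if PySem.Chars.startswith suffix "PHOTO-".toList ||
            PySem.Chars.startswith suffix "VIDEO-".toList
         then pvThreeFields (PySem.List.slice suffix (some 6) none) else none) with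
  | some date => date
  | none =>
      if hlt : PySem.Chars.find suffix ['-'] < 0 then "unknown-date".toList
      else pvBLoop (PySem.List.slice suffix (some (PySem.Chars.find suffix ['-'] + 1)) none)
termination_by suffix.length
decreasing_by
  have h0 : (0 : Int) ≤ PySem.Chars.find suffix ['-'] := by omega
  have hsp := (PySem.Chars.find_spec (s := suffix) (sub := ['-']) h0).1
  have hlen : (PySem.Chars.find suffix ['-']).toNat < suffix.length := by
    rcases hsp with ⟨r, hr⟩
    have := congrArg List.length hr
    simp at this
    omega
  rw [PySem.List.slice_from suffix (by omega)]
  simp only [List.length_drop]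
  omega

def parse_date_from_filename_alt (filename : String) : String :=
  String.ofList (pvBLoop filename.toList)

-- ===== PRECONDITION & SPEC =====
def Spec_parse_date_from_filename (filename : String) (out : String) : Prop := out = parse_date_from_filename_alt filename
instance (filename : String) (out : String) : Decidable (Spec_parse_date_from_filename filename out) := by unfold Spec_parse_date_from_filename; infer_instance

-- ===== CLAIM (what is proved, stated in full; the proofs are below) =====
def Claim_equal_parse_date_from_filename : Prop := ∀ (filename : String), Dom_parse_date_from_filename filename → Spec_parse_date_from_filename filename (parse_date_from_filename filename)

-- ===== LEMMAS AND PROOFS =====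

-- proof-only model of str.split("-") : the token list, built structurally
def pvConsHead (a : Char) : List (List Char) → List (List Char)
  | [] => [[a]]
  | x :: xs => (a :: x) :: xs

def pvSplit : List Char → List (List Char)
  | [] => [[]]
  | a :: t => if a = '-' then [] :: pvSplit t else pvConsHead a (pvSplit t)

def pvPreHead (p : List Char) : List (List Char) → List (List Char)
  | [] => [p]
  | x :: xs => (p ++ x) :: xs

def pvJoin : List (List Char) → List Char
  | [] => []
  | [x] => x
  | x :: y :: xs => x ++ '-' :: pvJoin (y :: xs)

-- common token-level reading of both loops
def pvTok : List (List Char) → List Char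
  | [] => "unknown-date".toList
  | p :: ps =>
      if p = "PHOTO".toList ∨ p = "VIDEO".toList then
        match ps with
        | y :: m :: d :: _ => y ++ '-' :: (m ++ '-' :: d)
        | _ => pvTok ps
      else pvTok ps

-- pvTok over List String (intermediate form of A's loop)
def pvStrTok : List String → String
  | [] => "unknown-date"
  | p :: ps =>
      if p = "PHOTO" ∨ p = "VIDEO" then
        match ps with
        | y :: m :: d :: _ => y ++ "-" ++ m ++ "-" ++ d
        | _ => pvStrTok ps
      else pvStrTok ps

lemma pvSplit_ne_nil (s : List Char) : pvSplit s ≠ [] := by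
  cases s with
  | nil => simp [pvSplit]
  | cons a t =>
    simp only [pvSplit]
    split
    · simp
    · cases h : pvSplit t <;> simp [pvConsHead]

lemma pvGo_eq (l : List Char) : ∀ (fuel : Nat) (cur : List Char) (acc : List (List Char)),
    l.length ≤ fuel →
    PySem.Chars.splitOn.go ['-'] fuel l cur acc = acc.reverse ++ pvPreHead cur.reverse (pvSplit l) := by
  induction l with
  | nil =>
    intro fuel cur acc _
    cases fuel <;> rw [PySem.Chars.splitOn.go] <;> simp [pvSplit, pvPreHead]
  | cons a t ih =>
    intro fuel cur acc hle
    cases fuel with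
    | zero => simp at hle
    | succ fuel =>
      by_cases ha : a = '-'
      · subst ha
        rw [PySem.Chars.splitOn.go]
        simp only [List.isPrefixOf, List.length_cons, beq_self_eq_true, Bool.true_and,
          if_true, List.drop_succ_cons, List.length_nil, List.drop_zero]
        rw [ih fuel [] (cur.reverse :: acc) (by simpa using Nat.lt_succ_iff.mp (by simpa using hle))]
        have hne := pvSplit_ne_nil t
        cases h : pvSplit t with
        | nil => exact absurd h hne
        | cons x xs => simp [pvSplit, pvPreHead, h]
      · rw [PySem.Chars.splitOn.go]
        simp only [List.isPrefixOf]
        rw [if_neg (by simp [Ne.symm ha])]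
        rw [ih fuel (a :: cur) acc (by simpa using Nat.lt_succ_iff.mp (by simpa using hle))]
        have hne := pvSplit_ne_nil t
        cases h : pvSplit t with
        | nil => exact absurd h hne
        | cons x xs => simp [pvSplit, pvPreHead, pvConsHead, h, ha]

lemma pvSplitOn_eq (s : List Char) : PySem.Chars.splitOn s ['-'] = pvSplit s := by
  rw [PySem.Chars.splitOn, pvGo_eq s (s.length + 1) [] [] (by omega)]
  have hne := pvSplit_ne_nil s
  cases h : pvSplit s with
  | nil => exact absurd h hne
  | cons x xs => simp [pvPreHead]

lemma pvSplit_no_hyphen (s : List Char) : ∀ p ∈ pvSplit s, '-' ∉ p := by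
  induction s with
  | nil => simp [pvSplit]
  | cons a t ih =>
    intro p hp
    simp only [pvSplit] at hp
    by_cases ha : a = '-'
    · rw [if_pos ha, List.mem_cons] at hp
      rcases hp with hp | hp
      · simp [hp]
      · exact ih p hp
    · rw [if_neg ha] at hp
      cases h : pvSplit t with
      | nil => exact absurd h (pvSplit_ne_nil t)
      | cons x xs =>
        rw [h] at hp
        simp only [pvConsHead, List.mem_cons] at hp
        rcases hp with hp | hp
        · subst hp
          have hx : '-' ∉ x := ih x (by simp [h])
          simp [Ne.symm ha, hx]
        · exact ih p (by simp [h, hp])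

lemma pvJoin_pvSplit (s : List Char) : pvJoin (pvSplit s) = s := by
  induction s with
  | nil => simp [pvSplit, pvJoin]
  | cons a t ih =>
    simp only [pvSplit]
    by_cases ha : a = '-'
    · rw [if_pos ha]
      cases h : pvSplit t with
      | nil => exact absurd h (pvSplit_ne_nil t)
      | cons x xs =>
        rw [h] at ih
        simp [pvJoin, ih, ha]
    · rw [if_neg ha]
      cases h : pvSplit t with
      | nil => exact absurd h (pvSplit_ne_nil t)
      | cons x xs =>
        rw [h] at ih
        cases xs with
        | nil => simp_all [pvConsHead, pvJoin]
        | cons y ys => simp_all [pvConsHead, pvJoin]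

-- a hyphen-free token followed by '-' is read off uniquely
lemma pvHyphenEq (p : List Char) : ∀ (w r r' : List Char), '-' ∉ p → '-' ∉ w →
    p ++ '-' :: r = w ++ '-' :: r' → p = w ∧ r = r' := by
  induction p with
  | nil =>
    intro w r r' _ hw heq
    cases w with
    | nil => simpa using heq
    | cons b w' =>
      simp only [List.nil_append, List.cons_append, List.cons.injEq] at heq
      exact absurd (by simp [← heq.1]) hw
  | cons a p' ih =>
    intro w r r' hp hw heq
    cases w with
    | nil =>
      simp only [List.cons_append, List.nil_append, List.cons.injEq] at heq
      exact absurd (by simp [heq.1]) hp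
    | cons b w' =>
      simp only [List.cons_append, List.cons.injEq] at heq
      obtain ⟨h1, h2⟩ := ih w' r r' (by simp at hp; exact hp.2) (by simp at hw; exact hw.2) heq.2
      exact ⟨by simp [heq.1, h1], h2⟩

lemma pvNoPrefixLt (p r : List Char) (hp : '-' ∉ p) (i : Nat) (hi : i < p.length) :
    ¬ (['-'] <+: (p ++ '-' :: r).drop i) := by
  intro hpre
  rw [List.drop_append_of_le_length (by omega)] at hpre
  cases h : p.drop i with
  | nil => have := congrArg List.length h; simp at this; omega
  | cons c cs =>
    rw [h] at hpre
    rcases hpre with ⟨u, hu⟩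
    simp only [List.cons_append, List.cons.injEq] at hu
    have hcmem : c ∈ p := List.mem_of_mem_drop (show c ∈ List.drop i p by rw [h]; simp)
    exact hp (by rw [hu.1]; exact hcmem)

lemma pvFind_join (p : List Char) (ps : List (List Char)) (hp : '-' ∉ p) :
    PySem.Chars.find (pvJoin (p :: ps)) ['-'] = if ps = [] then -1 else (p.length : Int) := by
  cases ps with
  | nil =>
    simp only [pvJoin, if_true]
    rw [PySem.Chars.find_eq_neg_one_iff]
    intro hinf
    exact hp ((List.singleton_infix_iff _ _).mp hinf)
  | cons y ys =>
    rw [if_neg (by simp)]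
    have hJ : pvJoin (p :: y :: ys) = p ++ '-' :: pvJoin (y :: ys) := by simp [pvJoin]
    rw [hJ]
    set s := p ++ '-' :: pvJoin (y :: ys) with hs
    have hinf : ['-'] <:+: s := ⟨p, pvJoin (y :: ys), by simp [hs]⟩
    have h0 : (0 : Int) ≤ PySem.Chars.find s ['-'] := (PySem.Chars.find_nonneg_iff s ['-']).mpr hinf
    obtain ⟨hpre, hmin⟩ := PySem.Chars.find_spec h0
    have hat : ['-'] <+: s.drop p.length := by
      rw [hs, List.drop_append_of_le_length (by simp)]
      simp
    have hge : p.length ≤ (PySem.Chars.find s ['-']).toNat := by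
      by_contra hlt
      exact pvNoPrefixLt p (pvJoin (y :: ys)) hp (PySem.Chars.find s ['-']).toNat (by omega) (by rw [← hs]; exact hpre)
    have hle : (PySem.Chars.find s ['-']).toNat ≤ p.length := by
      by_contra hlt
      exact hmin p.length (by omega) hat
    omega

lemma pvStarts_join (p w : List Char) (ps : List (List Char)) (hp : '-' ∉ p) (hw : '-' ∉ w) :
    (PySem.Chars.startswith (pvJoin (p :: ps)) (w ++ ['-']) = true) ↔ (p = w ∧ ps ≠ []) := by
  rw [PySem.Chars.startswith_iff]
  cases ps with
  | nil =>
    simp only [pvJoin]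
    constructor
    · rintro ⟨u, hu⟩
      exact absurd (show ('-') ∈ p by rw [← hu]; simp) hp
    · rintro ⟨_, h⟩; exact absurd rfl h
  | cons y ys =>
    have hJ : pvJoin (p :: y :: ys) = p ++ '-' :: pvJoin (y :: ys) := by simp [pvJoin]
    rw [hJ]
    constructor
    · rintro ⟨u, hu⟩
      have : p ++ '-' :: pvJoin (y :: ys) = w ++ '-' :: u := by
        rw [← hu]; simp
      exact ⟨(pvHyphenEq p w _ u hp hw this).1, by simp⟩
    · rintro ⟨rfl, _⟩
      exact ⟨pvJoin (y :: ys), by simp⟩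

lemma pvJoin_cons_cons (x y : List Char) (ys : List (List Char)) :
    pvJoin (x :: y :: ys) = x ++ '-' :: pvJoin (y :: ys) := rfl

lemma pvFind_join_cons (p y : List Char) (ys : List (List Char)) (hp : '-' ∉ p) :
    PySem.Chars.find (pvJoin (p :: y :: ys)) ['-'] = (p.length : Int) := by
  rw [pvFind_join p (y :: ys) hp]; simp

lemma pvFind_join_single (p : List Char) (hp : '-' ∉ p) :
    PySem.Chars.find (pvJoin [p]) ['-'] = -1 := by
  rw [pvFind_join p [] hp]; simp

lemma pvSliceFromLen (p l : List Char) :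
    PySem.List.slice (p ++ '-' :: l) (some ((p.length : Int) + 1)) none = l := by
  rw [PySem.List.slice_from _ (by omega),
      show p ++ '-' :: l = (p ++ ['-']) ++ l by simp,
      show (((p.length : Int)) + 1).toNat = (p ++ ['-']).length by simp]
  exact List.drop_left

lemma pvSliceToLen (p l : List Char) :
    PySem.List.slice (p ++ '-' :: l) none (some (p.length : Int)) = p := by
  rw [PySem.List.slice_to _ (by omega)]
  simp only [Int.toNat_natCast]
  exact List.take_left

lemma pvThreeFields_join (ts : List (List Char)) (hfree : ∀ p ∈ ts, '-' ∉ p) :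
    ts ≠ [] →
    pvThreeFields (pvJoin ts) =
      (match ts with
       | y :: m :: d :: _ => some (y ++ '-' :: (m ++ '-' :: d))
       | _ => none) := by
  match ts with
  | [] => intro h; exact absurd rfl h
  | [y] =>
    intro _
    simp only [pvThreeFields]
    rw [pvFind_join_single y (hfree y (by simp))]
    norm_num
  | [y, m] =>
    intro _
    have hy := hfree y (by simp)
    have hm := hfree m (by simp)
    simp only [pvThreeFields]
    rw [pvFind_join_cons y m [] hy, if_neg (show ¬ ((y.length : Int) < 0) by omega),
        pvJoin_cons_cons y m [], pvSliceFromLen y (pvJoin [m]),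
        pvFind_join_single m hm, if_pos (show (-1 : Int) < 0 by norm_num)]
  | y :: m :: d :: rest =>
    intro _
    have hy := hfree y (by simp)
    have hm := hfree m (by simp)
    have hd := hfree d (by simp)
    simp only [pvThreeFields]
    rw [pvFind_join_cons y m (d :: rest) hy, if_neg (show ¬ ((y.length : Int) < 0) by omega),
        pvJoin_cons_cons y m (d :: rest), pvSliceFromLen y (pvJoin (m :: d :: rest)),
        pvFind_join_cons m d rest hm, if_neg (show ¬ ((m.length : Int) < 0) by omega),
        pvJoin_cons_cons m d rest, pvSliceFromLen m (pvJoin (d :: rest)),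
        pvSliceToLen y (m ++ '-' :: pvJoin (d :: rest)),
        pvSliceToLen m (pvJoin (d :: rest))]
    cases rest with
    | nil =>
      rw [pvFind_join_single d hd, if_pos (show (-1 : Int) < 0 by norm_num)]
      rfl
    | cons e rest' =>
      rw [pvFind_join_cons d e rest' hd, if_neg (show ¬ ((d.length : Int) < 0) by omega),
          pvJoin_cons_cons d e rest', pvSliceToLen d (pvJoin (e :: rest'))]

-- unfolding equations for pvBLoop, phrased on the scrutinee of its match
lemma pvBLoop_eq_date (suffix date : List Char)
    (h : (if PySem.Chars.startswith suffix "PHOTO-".toList ||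
             PySem.Chars.startswith suffix "VIDEO-".toList
          then pvThreeFields (PySem.List.slice suffix (some 6) none) else none) = some date) :
    pvBLoop suffix = date := by
  rw [pvBLoop, h]

lemma pvBLoop_eq_advance (suffix : List Char)
    (h : (if PySem.Chars.startswith suffix "PHOTO-".toList ||
             PySem.Chars.startswith suffix "VIDEO-".toList
          then pvThreeFields (PySem.List.slice suffix (some 6) none) else none) = none) :
    pvBLoop suffix =
      if PySem.Chars.find suffix ['-'] < 0 then "unknown-date".toList
      else pvBLoop (PySem.List.slice suffix (some (PySem.Chars.find suffix ['-'] + 1)) none) := by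
  rw [pvBLoop, h]
  simp

lemma pvTok_short_marker (p : List Char) (ps : List (List Char)) (hlen : ps.length < 3)
    (hm : p = "PHOTO".toList ∨ p = "VIDEO".toList) : pvTok (p :: ps) = pvTok ps := by
  match ps with
  | [] => simp only [pvTok, if_pos hm]
  | [y] => simp only [pvTok, if_pos hm]
  | [y, m] => simp only [pvTok, if_pos hm]
  | y :: m :: d :: rest => exact absurd hlen (by simp only [List.length_cons]; omega)

lemma pvBLoop_join (ts : List (List Char)) (hfree : ∀ p ∈ ts, '-' ∉ p) :
    ts ≠ [] → pvBLoop (pvJoin ts) = pvTok ts := by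
  induction ts with
  | nil => intro h; exact absurd rfl h
  | cons p ps ih =>
    intro _
    have hp := hfree p (by simp)
    have hPl : "PHOTO-".toList = "PHOTO".toList ++ ['-'] := by decide
    have hVl : "VIDEO-".toList = "VIDEO".toList ++ ['-'] := by decide
    have hPfree : ('-') ∉ "PHOTO".toList := by decide
    have hVfree : ('-') ∉ "VIDEO".toList := by decide
    by_cases hmark : (p = "PHOTO".toList ∨ p = "VIDEO".toList) ∧ ps ≠ []
    · -- marker token with at least one token after it: the startswith test fires
      have hsw : (PySem.Chars.startswith (pvJoin (p :: ps)) "PHOTO-".toList ||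
                  PySem.Chars.startswith (pvJoin (p :: ps)) "VIDEO-".toList) = true := by
        rcases hmark.1 with h | h
        · rw [hPl, Bool.or_eq_true]
          exact Or.inl ((pvStarts_join p _ ps hp hPfree).mpr ⟨h, hmark.2⟩)
        · rw [hVl, Bool.or_eq_true]
          exact Or.inr ((pvStarts_join p _ ps hp hVfree).mpr ⟨h, hmark.2⟩)
      have hplen : p.length = 5 := by
        rcases hmark.1 with h | h <;> subst h <;> decide
      obtain ⟨y, ps', rfl⟩ : ∃ y ps', ps = y :: ps' := by
        cases ps with
        | nil => exact absurd rfl hmark.2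
        | cons y ps' => exact ⟨y, ps', rfl⟩
      have hslice : PySem.List.slice (pvJoin (p :: y :: ps')) (some 6) none = pvJoin (y :: ps') := by
        have h6 : ((6 : Int)) = ((p.length : Int) + 1) := by rw [hplen]; norm_num
        rw [pvJoin_cons_cons, h6]
        exact pvSliceFromLen p (pvJoin (y :: ps'))
      have hTF := pvThreeFields_join (y :: ps') (fun q hq => hfree q (by simp [hq])) (by simp)
      cases ps' with
      | nil =>
        -- only one token after the marker: _three_fields fails, advance past the marker's hyphen
        rw [pvBLoop_eq_advance _ (by rw [if_pos hsw, hslice, hTF])]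
        rw [pvFind_join_cons p y [] hp, if_neg (show ¬ ((p.length : Int) < 0) by omega),
            pvJoin_cons_cons p y [], pvSliceFromLen p (pvJoin [y]),
            ih (fun q hq => hfree q (by simp [hq])) (by simp),
            pvTok_short_marker p [y] (by simp) hmark.1]
      | cons m ps'' =>
        cases ps'' with
        | nil =>
          -- two tokens after the marker: still too few
          rw [pvBLoop_eq_advance _ (by rw [if_pos hsw, hslice, hTF])]
          rw [pvFind_join_cons p y [m] hp, if_neg (show ¬ ((p.length : Int) < 0) by omega),
              pvJoin_cons_cons p y [m], pvSliceFromLen p (pvJoin [y, m]),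
              ih (fun q hq => hfree q (by simp [hq])) (by simp),
              pvTok_short_marker p [y, m] (by simp) hmark.1]
        | cons d rest =>
          rw [pvBLoop_eq_date _ _ (by rw [if_pos hsw, hslice, hTF])]
          simp only [pvTok, if_pos hmark.1]
    · -- no qualifying marker here: both startswith tests are false
      have hsw : (PySem.Chars.startswith (pvJoin (p :: ps)) "PHOTO-".toList ||
                  PySem.Chars.startswith (pvJoin (p :: ps)) "VIDEO-".toList) = false := by
        rw [hPl, hVl, Bool.or_eq_false_iff]
        refine ⟨Bool.eq_false_iff.mpr fun hc => ?_, Bool.eq_false_iff.mpr fun hc => ?_⟩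
        · obtain ⟨h1, h2⟩ := (pvStarts_join p _ ps hp hPfree).mp hc
          exact hmark ⟨Or.inl h1, h2⟩
        · obtain ⟨h1, h2⟩ := (pvStarts_join p _ ps hp hVfree).mp hc
          exact hmark ⟨Or.inr h1, h2⟩
      rw [pvBLoop_eq_advance _ (by rw [hsw]; rfl)]
      cases ps with
      | nil =>
        rw [pvFind_join_single p hp, if_pos (show (-1 : Int) < 0 by norm_num)]
        by_cases hm : p = "PHOTO".toList ∨ p = "VIDEO".toList
        · rw [pvTok_short_marker p [] (by simp) hm]; rfl
        · simp only [pvTok, if_neg hm]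
      | cons y ps' =>
        rw [pvFind_join_cons p y ps' hp, if_neg (show ¬ ((p.length : Int) < 0) by omega),
            pvJoin_cons_cons p y ps', pvSliceFromLen p (pvJoin (y :: ps')),
            ih (fun q hq => hfree q (by simp [hq])) (by simp)]
        have hm : ¬ (p = "PHOTO".toList ∨ p = "VIDEO".toList) := fun hc => hmark ⟨hc, by simp⟩
        simp only [pvTok, if_neg hm]

-- ===== A-side: the index loop over parts is the token-level loop =====
lemma pvGet_append (pre l : List String) (k : Nat) (hk : k < l.length) :
    PySem.List.pyGetD (pre ++ l) ((pre.length : Int) + k) "" = l[k] := by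
  rw [show ((pre.length : Int) + k) = ((pre.length + k : Nat) : Int) by push_cast; ring,
    PySem.List.pyGetD_natCast]
  simp [List.getD_eq_getElem?_getD, hk]

lemma pvStrTok_short (a : String) (t : List String) (h : t.length < 3) :
    pvStrTok (a :: t) = pvStrTok t := by
  match t with
  | [] => simp only [pvStrTok]; split <;> rfl
  | [b] => simp only [pvStrTok]; split <;> rfl
  | [b, c] => simp only [pvStrTok]; split <;> rfl
  | b :: c :: d :: rest => exact absurd h (by simp only [List.length_cons]; omega)

lemma pvALoop_eq (suf pre : List String) :
    pvALoop (pre ++ suf) (pre.length : Int) suf = pvStrTok suf := by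
  induction suf generalizing pre with
  | nil => simp [pvALoop, pvStrTok]
  | cons a t ih =>
    match t with
    | b :: c :: d :: rest =>
      by_cases hm : a = "PHOTO" ∨ a = "VIDEO"
      · rw [pvALoop]
        have hlen : (pre.length : Int) + 3 < ((pre ++ a :: b :: c :: d :: rest).length : Int) := by
          simp; omega
        rw [if_pos ⟨hm, hlen⟩]
        rw [show ((pre.length : Int) + 1) = ((pre.length : Int) + (1 : Nat)) by norm_num,
          pvGet_append pre _ 1 (by simp),
          show ((pre.length : Int) + 2) = ((pre.length : Int) + (2 : Nat)) by norm_num,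
          pvGet_append pre _ 2 (by simp),
          show ((pre.length : Int) + 3) = ((pre.length : Int) + (3 : Nat)) by norm_num,
          pvGet_append pre _ 3 (by simp)]
        simp [pvStrTok, if_pos hm]
      · rw [pvALoop, if_neg (by tauto)]
        have := ih (pre := pre ++ [a])
        rw [show pvStrTok (a :: b :: c :: d :: rest) = pvStrTok (b :: c :: d :: rest) by
          simp only [pvStrTok, if_neg hm]]
        simpa [List.append_assoc] using this
    | ([] : List String) =>
      rw [pvALoop, if_neg (by rintro ⟨-, hx⟩; simp at hx)]
      rw [pvStrTok_short a [] (by simp)]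
      simpa using ih (pre := pre ++ [a])
    | [b] =>
      rw [pvALoop, if_neg (by rintro ⟨-, hx⟩; simp at hx)]
      rw [pvStrTok_short a [b] (by simp)]
      simpa using ih (pre := pre ++ [a])
    | [b, c] =>
      rw [pvALoop, if_neg (by rintro ⟨-, hx⟩; simp at hx)]
      rw [pvStrTok_short a [b, c] (by simp)]
      simpa using ih (pre := pre ++ [a])

lemma pvStrTok_map (ts : List (List Char)) :
    pvStrTok (ts.map String.ofList) = String.ofList (pvTok ts) := by
  induction ts with
  | nil => rfl
  | cons p ps ih =>
    have hiff : (String.ofList p = "PHOTO" ∨ String.ofList p = "VIDEO") ↔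
        (p = "PHOTO".toList ∨ p = "VIDEO".toList) := by
      constructor
      · rintro (h | h)
        · exact Or.inl (by have := congrArg String.toList h; simpa using this)
        · exact Or.inr (by have := congrArg String.toList h; simpa using this)
      · rintro (rfl | rfl) <;> simp
    by_cases hm : p = "PHOTO".toList ∨ p = "VIDEO".toList
    · match ps with
      | [] =>
        simp only [List.map, pvStrTok, pvTok, if_pos hm, if_pos (hiff.mpr hm)]
        exact ih
      | [y] =>
        simp only [List.map, pvStrTok, pvTok, if_pos hm, if_pos (hiff.mpr hm)]
        exact ih
      | [y, m] =>
        simp only [List.map, pvStrTok, pvTok, if_pos hm, if_pos (hiff.mpr hm)]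
        exact ih
      | y :: m :: d :: rest =>
        simp only [List.map, pvStrTok, pvTok, if_pos hm, if_pos (hiff.mpr hm)]
        refine String.toList_inj.mp ?_
        simp
    · match ps with
      | [] =>
        simp only [List.map, pvStrTok, pvTok, if_neg hm, if_neg (fun hc => hm (hiff.mp hc))]
        exact ih
      | y :: ps' =>
        simp only [List.map, pvStrTok, pvTok, if_neg hm, if_neg (fun hc => hm (hiff.mp hc))]
        match ps' with
        | [] => exact ih
        | [m] => exact ih
        | [m, d] => exact ih
        | m :: d :: e :: rest => exact ih

lemma pvParts_eq (s : String) :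
    (PySem.Str.split? s "-").getD [] = (pvSplit s.toList).map String.ofList := by
  rw [PySem.Str.split?.eq_1]
  have : PySem.Chars.split? s.toList ("-").toList = some (pvSplit s.toList) := by
    rw [PySem.Chars.split?.eq_1, if_neg (by decide)]
    rw [show ("-").toList = ['-'] from rfl, pvSplitOn_eq]
  rw [this]
  rfl

-- ===== VERDICT (by name: the statement is the Claim_ definition above) =====
theorem parse_date_from_filename_spec : Claim_equal_parse_date_from_filename := by
  intro filename _
  unfold Spec_parse_date_from_filename parse_date_from_filename parse_date_from_filename_alt
  rw [pvParts_eq]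
  have hA := pvALoop_eq ((pvSplit filename.toList).map String.ofList) []
  simp only [List.nil_append, List.length_nil, Nat.cast_zero] at hA
  rw [hA, pvStrTok_map]
  have hB : pvBLoop filename.toList = pvTok (pvSplit filename.toList) := by
    conv_lhs => rw [← pvJoin_pvSplit filename.toList]
    exact pvBLoop_join _ (pvSplit_no_hyphen filename.toList) (pvSplit_ne_nil filename.toList)
  rw [hB]
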